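-- pv_equiv track=rewrite | github.com/stutee274/trojan_detection | test3.py | identify_signal
-- ===== SOURCE A (Python) =====
-- def identify_signal(signal_names, is_trusted):
--     for symbol, parts in signal_names.items():
--         parts_str = ' '.join(parts).lower()
--         if is_trusted and 'count' in parts_str and 'trust' in parts_str:
--             return symbol
--         elif not is_trusted and 'count' in parts_str and 'trojan' in parts_str:
--             return symbol
--
--     for symbol, parts in signal_names.items():
--         if any('count' in part.lower() for part in parts):
--             return symbol
--     return None
-- ===== SOURCE B (Python) =====
-- def identify_signal(signal_names, is_trusted):
--     keyword = 'trust' if is_trusted else 'trojan'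
--     fallback = None
--     for symbol, parts in signal_names.items():
--         parts_str = ' '.join(parts).lower()
--         if 'count' in parts_str and keyword in parts_str:
--             return symbol
--         if fallback is None and any('count' in part.lower() for part in parts):
--             fallback = symbol
--     return fallback
-- ===== Notes on version B (the rewrite author's own statement) =====
-- stated objective: alternative
-- what changed: Replaces A's two full scans (primary keyword pass, then a separate count-only pass) with one fused pass that returns eagerly on a primary match and records the first count-only symbol as a fallback in a single variable.
import Mathlib
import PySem

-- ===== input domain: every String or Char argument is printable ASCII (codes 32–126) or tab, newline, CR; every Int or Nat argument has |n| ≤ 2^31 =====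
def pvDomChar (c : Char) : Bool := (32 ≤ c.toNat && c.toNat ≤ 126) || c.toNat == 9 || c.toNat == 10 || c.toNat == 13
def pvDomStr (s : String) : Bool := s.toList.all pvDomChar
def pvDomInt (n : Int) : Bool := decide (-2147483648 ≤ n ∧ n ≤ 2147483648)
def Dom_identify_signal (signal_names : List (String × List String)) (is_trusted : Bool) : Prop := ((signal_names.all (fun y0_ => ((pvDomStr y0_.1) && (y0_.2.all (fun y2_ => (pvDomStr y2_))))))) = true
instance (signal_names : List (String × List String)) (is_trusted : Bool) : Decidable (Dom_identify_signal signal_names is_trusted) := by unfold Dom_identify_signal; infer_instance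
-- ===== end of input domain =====

-- B fuses A's two scans into one pass with an eager primary return and a single fallback variable (objective: alternative).

-- ===== PORT A =====
-- first loop of A: primary trust/trojan + count match (early return)
def pvALoop1 (signal_names : List (String × List String)) (is_trusted : Bool) : Option String :=
  match signal_names with
  | [] => none
  | (symbol, parts) :: rest =>
    let parts_str := PySem.Str.lower (PySem.Str.join " " parts)
    if is_trusted && PySem.Str.isIn "count" parts_str && PySem.Str.isIn "trust" parts_str then
      some symbol
    else if !is_trusted && PySem.Str.isIn "count" parts_str && PySem.Str.isIn "trojan" parts_str then
      some symbol
    else pvALoop1 rest is_trusted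

-- second loop of A: first symbol with any part containing 'count'
def pvALoop2 (signal_names : List (String × List String)) : Option String :=
  match signal_names with
  | [] => none
  | (symbol, parts) :: rest =>
    if parts.any (fun part => PySem.Str.isIn "count" (PySem.Str.lower part)) then some symbol
    else pvALoop2 rest

def identify_signal (signal_names : List (String × List String)) (is_trusted : Bool) : Option String :=
  match pvALoop1 signal_names is_trusted with
  | some symbol => some symbol
  | none => pvALoop2 signal_names

-- ===== PORT B =====
-- B's single pass: eager return on a primary match, first count-only symbol kept as fallback
def pvBLoop (signal_names : List (String × List String)) (keyword : String) (fallback : Option String) : Option String :=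
  match signal_names with
  | [] => fallback
  | (symbol, parts) :: rest =>
    let parts_str := PySem.Str.lower (PySem.Str.join " " parts)
    if PySem.Str.isIn "count" parts_str && PySem.Str.isIn keyword parts_str then
      some symbol
    else if fallback.isNone && parts.any (fun part => PySem.Str.isIn "count" (PySem.Str.lower part)) then
      pvBLoop rest keyword (some symbol)
    else pvBLoop rest keyword fallback

def identify_signal_alt (signal_names : List (String × List String)) (is_trusted : Bool) : Option String :=
  pvBLoop signal_names (if is_trusted then "trust" else "trojan") none

-- ===== PRECONDITION & SPEC =====
def Spec_identify_signal (signal_names : List (String × List String)) (is_trusted : Bool) (out : Option String) : Prop := out = identify_signal_alt signal_names is_trusted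
instance (signal_names : List (String × List String)) (is_trusted : Bool) (out : Option String) : Decidable (Spec_identify_signal signal_names is_trusted out) := by unfold Spec_identify_signal; infer_instance

-- ===== CLAIM (what is proved, stated in full; the proofs are below) =====
def Claim_equal_identify_signal : Prop := ∀ (signal_names : List (String × List String)) (is_trusted : Bool), Dom_identify_signal signal_names is_trusted → Spec_identify_signal signal_names is_trusted (identify_signal signal_names is_trusted)

-- ===== LEMMAS AND PROOFS =====

-- loop invariant (untrusted case): B's fused loop equals A's first loop, falling back to the
-- recorded fallback first and then A's second loop
theorem pvBLoop_eq_false (signal_names : List (String × List String)) (fallback : Option String) :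
    pvBLoop signal_names "trojan" fallback
      = match pvALoop1 signal_names false with
        | some symbol => some symbol
        | none => match fallback with
                  | some f => some f
                  | none => pvALoop2 signal_names := by
  induction signal_names generalizing fallback with
  | nil => cases fallback <;> simp [pvBLoop, pvALoop1, pvALoop2]
  | cons hd tl ih =>
    obtain ⟨symbol, parts⟩ := hd
    simp only [pvBLoop, pvALoop1, Bool.not_false, Bool.true_and, Bool.false_and,
      Bool.false_eq_true, if_false, ite_false]
    by_cases hp : (PySem.Str.isIn "count" (PySem.Str.lower (PySem.Str.join " " parts))
        && PySem.Str.isIn "trojan" (PySem.Str.lower (PySem.Str.join " " parts))) = true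
    · rw [if_pos hp, if_pos hp]
    · rw [if_neg hp, if_neg hp]
      cases fallback with
      | some f =>
        simp only [Option.isNone_some, Bool.false_and, Bool.false_eq_true, if_false, ite_false]
        rw [ih]
      | none =>
        simp only [Option.isNone_none, Bool.true_and, pvALoop2]
        by_cases hc : (parts.any fun part =>
            PySem.Str.isIn "count" (PySem.Str.lower part)) = true
        · rw [if_pos hc, if_pos hc, ih]
        · rw [if_neg hc, if_neg hc, ih]

-- loop invariant (trusted case)
theorem pvBLoop_eq_true (signal_names : List (String × List String)) (fallback : Option String) :
    pvBLoop signal_names "trust" fallback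
      = match pvALoop1 signal_names true with
        | some symbol => some symbol
        | none => match fallback with
                  | some f => some f
                  | none => pvALoop2 signal_names := by
  induction signal_names generalizing fallback with
  | nil => cases fallback <;> simp [pvBLoop, pvALoop1, pvALoop2]
  | cons hd tl ih =>
    obtain ⟨symbol, parts⟩ := hd
    simp only [pvBLoop, pvALoop1, Bool.not_true, Bool.true_and, Bool.false_and,
      Bool.false_eq_true, if_false, ite_false]
    by_cases hp : (PySem.Str.isIn "count" (PySem.Str.lower (PySem.Str.join " " parts))
        && PySem.Str.isIn "trust" (PySem.Str.lower (PySem.Str.join " " parts))) = true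
    · rw [if_pos hp, if_pos hp]
    · rw [if_neg hp, if_neg hp]
      cases fallback with
      | some f =>
        simp only [Option.isNone_some, Bool.false_and, Bool.false_eq_true, if_false, ite_false]
        rw [ih]
      | none =>
        simp only [Option.isNone_none, Bool.true_and, pvALoop2]
        by_cases hc : (parts.any fun part =>
            PySem.Str.isIn "count" (PySem.Str.lower part)) = true
        · rw [if_pos hc, if_pos hc, ih]
        · rw [if_neg hc, if_neg hc, ih]

-- ===== VERDICT (by name: the statement is the Claim_ definition above) =====
theorem identify_signal_spec : Claim_equal_identify_signal := by
  intro signal_names is_trusted _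
  unfold Spec_identify_signal identify_signal identify_signal_alt
  cases is_trusted
  · rw [if_neg (by simp), pvBLoop_eq_false]
  · rw [if_pos rfl, pvBLoop_eq_true]
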